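-- pv_equiv track=rewrite | github.com/ngyz96/JHU_GENOMICS_DS | ALGO_DNA_SEQ/WEEK3/hw_3.py | editDistance_Fewest_Edits
-- ===== SOURCE A (Python) =====
-- def editDistance_Fewest_Edits(P, T):
--     # Create distance matrix
--     D = []
--     for i in range(len(P)+1):
--         D.append([0]*(len(T)+1))
--     # Initialize first column of matrix
--     for i in range(len(P)+1):
--         D[i][0] = i
--     # Fill in the rest of the matrix
--     for i in range(1, len(P)+1):
--         for j in range(1, len(T)+1):
--             distHor = D[i][j-1] + 1
--             distVer = D[i-1][j] + 1
--             if P[i-1] == T[j-1]: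
--                 distDiag = D[i-1][j-1]
--             else:
--                 distDiag = D[i-1][j-1] + 1
--             D[i][j] = min(distHor, distVer, distDiag)
--     # Edit distance is the min_value in the bottom row of the matrix
--     # min_index = min(D[-1])
--     return min(D[-1])
-- ===== SOURCE B (Python) =====
-- def editDistance_Fewest_Edits(P, T):
--     # Top-down demand-driven evaluation of the approximate-match edit-distance
--     # recurrence: a work stack of (i, j, expanded) frames and a dict cache,
--     # computing only the cells the answer needs, in dependency order.
--     m, n = len(P), len(T)
--     cache = {}
--     stack = [(m, j, False) for j in range(n + 1)]
--     while stack: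
--         i, j, ex = stack.pop()
--         if (i, j) in cache:
--             continue
--         if i == 0:
--             cache[(i, j)] = 0
--         elif j == 0:
--             cache[(i, j)] = i
--         elif ex:
--             cache[(i, j)] = min(cache[(i, j - 1)] + 1,
--                                 cache[(i - 1, j)] + 1,
--                                 cache[(i - 1, j - 1)]
--                                 + (0 if P[i - 1] == T[j - 1] else 1))
--         else:
--             stack.append((i, j, True))
--             stack.append((i, j - 1, False))
--             stack.append((i - 1, j, False))
--             stack.append((i - 1, j - 1, False))
--     return min(cache[(m, j)] for j in range(n + 1))
-- ===== Notes on version B (the rewrite author's own statement) =====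
-- stated objective: alternative
-- what changed: B replaces A's bottom-up full-matrix fill (build, initialize, then doubly-nested index loops) by top-down demand-driven memoization: an explicit work stack of (i,j,expanded) frames and a dict cache evaluate the same recurrence cell by cell in dependency order.
import Mathlib
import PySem

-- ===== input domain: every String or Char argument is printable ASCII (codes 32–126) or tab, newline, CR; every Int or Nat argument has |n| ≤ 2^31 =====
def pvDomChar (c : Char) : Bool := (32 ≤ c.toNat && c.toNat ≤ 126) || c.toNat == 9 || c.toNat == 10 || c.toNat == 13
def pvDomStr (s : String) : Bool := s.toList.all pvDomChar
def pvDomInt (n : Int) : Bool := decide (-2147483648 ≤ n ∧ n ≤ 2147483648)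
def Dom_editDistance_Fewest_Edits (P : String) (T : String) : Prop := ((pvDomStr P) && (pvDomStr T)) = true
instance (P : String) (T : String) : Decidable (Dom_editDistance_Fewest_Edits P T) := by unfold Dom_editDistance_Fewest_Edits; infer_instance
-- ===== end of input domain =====

-- B replaces A's bottom-up full-matrix fill by top-down demand-driven memoization
-- (an explicit work stack of (i, j, expanded) frames and a dict cache); proved to return A's exact result.

-- ===== PORT A =====
-- matrix read/write helpers (python D[i][j] and D[i][j] = v; all of A's accesses are in range)
def pvGetM (d : List (List Int)) (i j : Nat) : Int := (d.getD i []).getD j 0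
def pvSetM (d : List (List Int)) (i j : Nat) (v : Int) : List (List Int) :=
  d.set i ((d.getD i []).set j v)

-- body of A's inner j-loop
def aInner (p t : List Char) (i : Nat) (d : List (List Int)) (j : Nat) : List (List Int) :=
  let distHor := pvGetM d i (j - 1) + 1
  let distVer := pvGetM d (i - 1) j + 1
  let distDiag := if p.getD (i - 1) ' ' = t.getD (j - 1) ' '
    then pvGetM d (i - 1) (j - 1) else pvGetM d (i - 1) (j - 1) + 1
  pvSetM d i j (min (min distHor distVer) distDiag)

-- body of A's outer i-loop
def aOuter (p t : List Char) (d : List (List Int)) (i : Nat) : List (List Int) :=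
  (List.range' 1 t.length).foldl (aInner p t i) d

def editDistance_Fewest_Edits (P : String) (T : String) : Int :=
  let p := P.toList
  let t := T.toList
  -- Create distance matrix
  let D0 := (List.range (p.length + 1)).foldl
      (fun d _ => d ++ [List.replicate (t.length + 1) (0 : Int)]) []
  -- Initialize first column of matrix
  let D1 := (List.range (p.length + 1)).foldl (fun d i => pvSetM d i 0 (Int.ofNat i)) D0
  -- Fill in the rest of the matrix
  let D2 := (List.range' 1 p.length).foldl (aOuter p t) D1
  -- min of the bottom row (python min raises only on an empty list; the row is nonempty)
  match (D2.getLastD []).min? with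
  | some v => v
  | none => 0

-- ===== PORT B =====
-- weight of a stack frame and the loop's termination potential (proof device only; the Python loop has no counter)
def bEntryW : Nat × Nat × Bool → Nat
  | (i, j, false) => 4 ^ (i + j + 2)
  | (_, _, true) => 1

def bPhi (st : List (Nat × Nat × Bool)) : Nat := (st.map bEntryW).sum

theorem bPhi_cons (e : Nat × Nat × Bool) (st : List (Nat × Nat × Bool)) :
    bPhi (e :: st) = bEntryW e + bPhi st := by simp [bPhi]

theorem bEntryW_pos (e : Nat × Nat × Bool) : 1 ≤ bEntryW e := by
  obtain ⟨i, j, ex⟩ := e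
  cases ex
  · simpa [bEntryW] using Nat.one_le_pow (i + j + 2) 4 (by norm_num)
  · simp [bEntryW]

theorem bPhi_expand (i j : Nat) (hi : i ≠ 0) (hj : j ≠ 0) :
    bEntryW (i - 1, j - 1, false) + (bEntryW (i - 1, j, false)
      + (bEntryW (i, j - 1, false) + bEntryW (i, j, true)))
    < bEntryW (i, j, false) := by
  simp only [bEntryW]
  have h1 : 4 ^ (i - 1 + (j - 1) + 2) ≤ 4 ^ (i + j + 1) :=
    Nat.pow_le_pow_right (by norm_num) (by omega)
  have h2 : 4 ^ (i - 1 + j + 2) ≤ 4 ^ (i + j + 1) :=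
    Nat.pow_le_pow_right (by norm_num) (by omega)
  have h3 : 4 ^ (i + (j - 1) + 2) ≤ 4 ^ (i + j + 1) :=
    Nat.pow_le_pow_right (by norm_num) (by omega)
  have h4 : 1 ≤ 4 ^ (i + j + 1) := Nat.one_le_pow _ _ (by norm_num)
  have h5 : 4 ^ (i + j + 2) = 4 * 4 ^ (i + j + 1) := by ring
  omega

-- python B's while-loop: pop a frame; skip if cached; base cases; compute from cached
-- dependencies when expanded; otherwise re-push expanded and push the three dependencies.
-- (cache[(i,j-1)] etc. are read with getD _ 0: the loop discipline guarantees the key is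
-- present exactly where Python's cache[...] lookup succeeds, so this is exact.)
def bLoop (p t : List Char) : List (Nat × Nat × Bool) → PySem.Dict (Nat × Nat) Int → PySem.Dict (Nat × Nat) Int
  | [], c => c
  | (i, j, ex) :: rest, c =>
    if c.contains (i, j) then bLoop p t rest c
    else if i = 0 then bLoop p t rest (c.insert (i, j) 0)
    else if j = 0 then bLoop p t rest (c.insert (i, j) (Int.ofNat i))
    else if ex then
      bLoop p t rest (c.insert (i, j)
        (min (min (c.getD (i, j - 1) 0 + 1) (c.getD (i - 1, j) 0 + 1))
             (c.getD (i - 1, j - 1) 0 + if p.getD (i - 1) ' ' = t.getD (j - 1) ' ' then 0 else 1)))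
    else
      bLoop p t ((i - 1, j - 1, false) :: (i - 1, j, false) :: (i, j - 1, false) :: (i, j, true) :: rest) c
  termination_by st _ => bPhi st
  decreasing_by
  · simp only [bPhi_cons]; have := bEntryW_pos (i, j, ex); omega
  · simp only [bPhi_cons]; have := bEntryW_pos (i, j, ex); omega
  · simp only [bPhi_cons]; have := bEntryW_pos (i, j, ex); omega
  · simp only [bPhi_cons]; have := bEntryW_pos (i, j, ex); omega
  · simp only [bPhi_cons]
    rename_i _h1 h2 h3 h4
    have hx : ex = false := by cases ex; rfl; exact absurd rfl h4
    subst hx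
    have := bPhi_expand i j h2 h3
    omega

def editDistance_Fewest_Edits_alt (P : String) (T : String) : Int :=
  let p := P.toList
  let t := T.toList
  let m := p.length
  let n := t.length
  -- stack = [(m, j, False) for j in range(n+1)]; python pops from the END, so the Lean
  -- head-first work list is that list reversed
  let cache := bLoop p t (((List.range (n + 1)).map (fun j => (m, j, false))).reverse) PySem.Dict.empty
  match ((List.range (n + 1)).map (fun j => cache.getD (m, j) 0)).min? with
  | some v => v
  | none => 0

-- ===== PRECONDITION & SPEC =====
def Spec_editDistance_Fewest_Edits (P : String) (T : String) (out : Int) : Prop := out = editDistance_Fewest_Edits_alt P T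
instance (P : String) (T : String) (out : Int) : Decidable (Spec_editDistance_Fewest_Edits P T out) := by unfold Spec_editDistance_Fewest_Edits; infer_instance

-- ===== CLAIM (what is proved, stated in full; the proofs are below) =====
def Claim_equal_editDistance_Fewest_Edits : Prop := ∀ (P : String) (T : String), Dom_editDistance_Fewest_Edits P T → Spec_editDistance_Fewest_Edits P T (editDistance_Fewest_Edits P T)

-- ===== LEMMAS AND PROOFS =====

-- the edit-distance recurrence both programs compute (proof-only reference function)
def edSpec (p t : List Char) : Nat → Nat → Int
  | i, j =>
    if _h1 : i = 0 then 0
    else if _h2 : j = 0 then Int.ofNat i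
    else
      min (min (edSpec p t i (j - 1) + 1) (edSpec p t (i - 1) j + 1))
          (edSpec p t (i - 1) (j - 1) + if p.getD (i - 1) ' ' = t.getD (j - 1) ' ' then 0 else 1)
  termination_by i j => i + j
  decreasing_by all_goals omega

theorem edSpec_zero (p t : List Char) (j : Nat) : edSpec p t 0 j = 0 := by
  rw [edSpec]; simp

theorem edSpec_col0 (p t : List Char) (i : Nat) : edSpec p t i 0 = Int.ofNat i := by
  rw [edSpec]
  by_cases h : i = 0 <;> simp [h]

theorem edSpec_step (p t : List Char) (i j : Nat) (hi : i ≠ 0) (hj : j ≠ 0) :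
    edSpec p t i j
      = min (min (edSpec p t i (j - 1) + 1) (edSpec p t (i - 1) j + 1))
          (edSpec p t (i - 1) (j - 1) + if p.getD (i - 1) ' ' = t.getD (j - 1) ' ' then 0 else 1) := by
  rw [edSpec]; simp [hi, hj]

-- ---- B side: the stack machine computes edSpec ----

def GoodC (p t : List Char) (c : PySem.Dict (Nat × Nat) Int) : Prop :=
  ∀ i j v, c.get? (i, j) = some v → v = edSpec p t i j

-- every expanded frame's three dependencies are cached or appear earlier (closer to the top)
def StackOKAux (c : PySem.Dict (Nat × Nat) Int) (seen : List (Nat × Nat)) :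
    List (Nat × Nat × Bool) → Prop
  | [] => True
  | (i, j, ex) :: rest =>
    (ex = true →
      (c.contains (i, j - 1) = true ∨ (i, j - 1) ∈ seen)
      ∧ (c.contains (i - 1, j) = true ∨ (i - 1, j) ∈ seen)
      ∧ (c.contains (i - 1, j - 1) = true ∨ (i - 1, j - 1) ∈ seen))
    ∧ StackOKAux c ((i, j) :: seen) rest

theorem stackOKAux_cons_iff (c : PySem.Dict (Nat × Nat) Int) (seen : List (Nat × Nat))
    (i j : Nat) (ex : Bool) (rest : List (Nat × Nat × Bool)) :
    StackOKAux c seen ((i, j, ex) :: rest) ↔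
    ((ex = true →
      (c.contains (i, j - 1) = true ∨ (i, j - 1) ∈ seen)
      ∧ (c.contains (i - 1, j) = true ∨ (i - 1, j) ∈ seen)
      ∧ (c.contains (i - 1, j - 1) = true ∨ (i - 1, j - 1) ∈ seen))
    ∧ StackOKAux c ((i, j) :: seen) rest) := by
  rw [StackOKAux]

theorem stackokaux_weaken (c c' : PySem.Dict (Nat × Nat) Int) :
    ∀ (st : List (Nat × Nat × Bool)) (seen seen' : List (Nat × Nat)),
    StackOKAux c seen st →
    (∀ k, (c.contains k = true ∨ k ∈ seen) → (c'.contains k = true ∨ k ∈ seen')) →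
    StackOKAux c' seen' st := by
  intro st
  induction st with
  | nil => intro _ _ _ _; trivial
  | cons e rest ih =>
    obtain ⟨i, j, ex⟩ := e
    intro seen seen' h hw
    rw [stackOKAux_cons_iff] at h ⊢
    refine ⟨fun hex => ?_, ?_⟩
    · obtain ⟨h1, h2, h3⟩ := h.1 hex
      exact ⟨hw _ h1, hw _ h2, hw _ h3⟩
    · refine ih ((i, j) :: seen) ((i, j) :: seen') h.2 (fun k hk => ?_)
      rcases hk with hc | hm
      · rcases hw k (Or.inl hc) with hc' | hm'
        · exact Or.inl hc'
        · exact Or.inr (List.mem_cons_of_mem _ hm')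
      · rcases List.mem_cons.mp hm with hm | hm
        · exact Or.inr (by simp [hm])
        · rcases hw k (Or.inr hm) with hc' | hm'
          · exact Or.inl hc'
          · exact Or.inr (List.mem_cons_of_mem _ hm')

theorem stackokaux_of_all_false (c : PySem.Dict (Nat × Nat) Int) :
    ∀ (st : List (Nat × Nat × Bool)) (seen : List (Nat × Nat)),
    (∀ e ∈ st, e.2.2 = false) → StackOKAux c seen st := by
  intro st
  induction st with
  | nil => intro _ _; trivial
  | cons e rest ih =>
    obtain ⟨i, j, ex⟩ := e
    intro seen hall
    have hex : ex = false := hall (i, j, ex) (by simp)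
    subst hex
    rw [stackOKAux_cons_iff]
    exact ⟨fun h => Bool.noConfusion h, ih _ (fun e he => hall e (by simp [he]))⟩

theorem goodC_insert (p t : List Char) (c : PySem.Dict (Nat × Nat) Int)
    (i j : Nat) (v : Int) (hg : GoodC p t c) (hv : v = edSpec p t i j) :
    GoodC p t (c.insert (i, j) v) := by
  intro i' j' w hw
  rw [PySem.Dict.get?_insert] at hw
  split_ifs at hw with he
  · cases hw
    obtain ⟨h1, h2⟩ := Prod.mk.injEq .. ▸ he
    subst h1; subst h2
    simpa using hv
  · exact hg i' j' w hw

theorem getD_eq_edSpec (p t : List Char) (c : PySem.Dict (Nat × Nat) Int)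
    (i j : Nat) (hc : c.contains (i, j) = true) (hg : GoodC p t c) :
    c.getD (i, j) 0 = edSpec p t i j := by
  have := PySem.Dict.contains_eq_isSome_get? c (i, j)
  rw [hc] at this
  obtain ⟨v, hv⟩ := Option.isSome_iff_exists.mp this.symm
  rw [PySem.Dict.getD_eq_get?_getD, hv]
  exact hg i j v hv

-- main invariant: running the loop keeps the cache correct, only grows it, and
-- caches the key of every frame that was on the stack
theorem bLoop_main (p t : List Char) :
    ∀ (N : Nat) (st : List (Nat × Nat × Bool)) (c : PySem.Dict (Nat × Nat) Int),
    bPhi st ≤ N → GoodC p t c → StackOKAux c [] st →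
    GoodC p t (bLoop p t st c)
    ∧ (∀ k, c.contains k = true → (bLoop p t st c).contains k = true)
    ∧ (∀ e ∈ st, (bLoop p t st c).contains (e.1, e.2.1) = true) := by
  intro N
  induction N with
  | zero =>
    intro st c hphi hg _
    match st with
    | [] => rw [bLoop]; exact ⟨hg, fun k hk => hk, by simp⟩
    | e :: rest =>
      exfalso
      have := bEntryW_pos e
      rw [bPhi_cons e rest] at hphi
      omega
  | succ N ih =>
    intro st c hphi hg hok
    match st with
    | [] => rw [bLoop]; exact ⟨hg, fun k hk => hk, by simp⟩
    | (i, j, ex) :: rest =>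
      rw [bPhi_cons] at hphi
      have hwpos := bEntryW_pos (i, j, ex)
      rw [stackOKAux_cons_iff] at hok
      rw [bLoop]
      by_cases hc : c.contains (i, j)
      · rw [if_pos hc]
        have hok' : StackOKAux c [] rest := by
          refine stackokaux_weaken c c rest [(i, j)] [] hok.2 (fun k hk => ?_)
          rcases hk with h | h
          · exact Or.inl h
          · simp at h; subst h; exact Or.inl hc
        obtain ⟨g1, g2, g3⟩ := ih rest c (by omega) hg hok'
        exact ⟨g1, g2, fun e he => by
          rcases List.mem_cons.mp he with he | he
          · subst he; exact g2 _ hc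
          · exact g3 e he⟩
      · rw [if_neg hc]
        by_cases hi : i = 0
        · rw [if_pos hi]
          have hg' : GoodC p t (c.insert (i, j) 0) :=
            goodC_insert p t c i j 0 hg (by rw [hi, edSpec_zero])
          have hok' : StackOKAux (c.insert (i, j) 0) [] rest := by
            refine stackokaux_weaken c (c.insert (i, j) 0) rest [(i, j)] [] hok.2 (fun k hk => ?_)
            rcases hk with h | h
            · exact Or.inl (by rw [PySem.Dict.contains_insert]; simp [h])
            · simp at h; subst h; exact Or.inl (PySem.Dict.contains_insert_self ..)
          obtain ⟨g1, g2, g3⟩ := ih rest _ (by omega) hg' hok'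
          refine ⟨g1, fun k hk => g2 k (by rw [PySem.Dict.contains_insert]; simp [hk]), fun e he => ?_⟩
          rcases List.mem_cons.mp he with he | he
          · subst he; exact g2 _ (PySem.Dict.contains_insert_self ..)
          · exact g3 e he
        · rw [if_neg hi]
          by_cases hj : j = 0
          · rw [if_pos hj]
            have hg' : GoodC p t (c.insert (i, j) (Int.ofNat i)) :=
              goodC_insert p t c i j _ hg (by rw [hj, edSpec_col0])
            have hok' : StackOKAux (c.insert (i, j) (Int.ofNat i)) [] rest := by
              refine stackokaux_weaken c _ rest [(i, j)] [] hok.2 (fun k hk => ?_)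
              rcases hk with h | h
              · exact Or.inl (by rw [PySem.Dict.contains_insert]; simp [h])
              · simp at h; subst h; exact Or.inl (PySem.Dict.contains_insert_self ..)
            obtain ⟨g1, g2, g3⟩ := ih rest _ (by omega) hg' hok'
            refine ⟨g1, fun k hk => g2 k (by rw [PySem.Dict.contains_insert]; simp [hk]), fun e he => ?_⟩
            rcases List.mem_cons.mp he with he | he
            · subst he; exact g2 _ (PySem.Dict.contains_insert_self ..)
            · exact g3 e he
          · rw [if_neg hj]
            by_cases hex : ex = true
            · rw [if_pos hex]
              -- the three dependencies are cached (seen = [] at the head)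
              obtain ⟨d1, d2, d3⟩ := hok.1 hex
              have hd1 : c.contains (i, j - 1) = true := by
                rcases d1 with h | h; exact h; cases h
              have hd2 : c.contains (i - 1, j) = true := by
                rcases d2 with h | h; exact h; cases h
              have hd3 : c.contains (i - 1, j - 1) = true := by
                rcases d3 with h | h; exact h; cases h
              have hv : (min (min (c.getD (i, j - 1) 0 + 1) (c.getD (i - 1, j) 0 + 1))
                  (c.getD (i - 1, j - 1) 0 + if p.getD (i - 1) ' ' = t.getD (j - 1) ' ' then 0 else 1))
                  = edSpec p t i j := by
                rw [getD_eq_edSpec p t c _ _ hd1 hg, getD_eq_edSpec p t c _ _ hd2 hg,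
                    getD_eq_edSpec p t c _ _ hd3 hg, edSpec_step p t i j hi hj]
              have hg' := goodC_insert p t c i j _ hg hv
              have hok' : StackOKAux (c.insert (i, j)
                  (min (min (c.getD (i, j - 1) 0 + 1) (c.getD (i - 1, j) 0 + 1))
                    (c.getD (i - 1, j - 1) 0 + if p.getD (i - 1) ' ' = t.getD (j - 1) ' ' then 0 else 1))) [] rest := by
                refine stackokaux_weaken c _ rest [(i, j)] [] hok.2 (fun k hk => ?_)
                rcases hk with h | h
                · exact Or.inl (by rw [PySem.Dict.contains_insert]; simp [h])
                · simp at h; subst h; exact Or.inl (PySem.Dict.contains_insert_self ..)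
              obtain ⟨g1, g2, g3⟩ := ih rest _ (by omega) hg' hok'
              refine ⟨g1, fun k hk => g2 k (by rw [PySem.Dict.contains_insert]; simp [hk]), fun e he => ?_⟩
              rcases List.mem_cons.mp he with he | he
              · subst he; exact g2 _ (PySem.Dict.contains_insert_self ..)
              · exact g3 e he
            · rw [if_neg hex]
              have hexf : ex = false := by cases ex; rfl; exact absurd rfl hex
              subst hexf
              have hphi' : bPhi ((i - 1, j - 1, false) :: (i - 1, j, false)
                  :: (i, j - 1, false) :: (i, j, true) :: rest) ≤ N := by
                simp only [bPhi_cons]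
                have := bPhi_expand i j hi hj
                omega
              have hok' : StackOKAux c [] ((i - 1, j - 1, false) :: (i - 1, j, false)
                  :: (i, j - 1, false) :: (i, j, true) :: rest) := by
                rw [stackOKAux_cons_iff, stackOKAux_cons_iff, stackOKAux_cons_iff,
                    stackOKAux_cons_iff]
                refine ⟨fun h => Bool.noConfusion h, fun h => Bool.noConfusion h, fun h => Bool.noConfusion h, ?_, ?_⟩
                · exact fun _ => ⟨Or.inr (by simp), Or.inr (by simp), Or.inr (by simp)⟩
                · refine stackokaux_weaken c c rest [(i, j)] _ hok.2 (fun k hk => ?_)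
                  rcases hk with h | h
                  · exact Or.inl h
                  · simp at h; subst h; exact Or.inr (by simp)
              obtain ⟨g1, g2, g3⟩ := ih _ c hphi' hg hok'
              refine ⟨g1, g2, fun e he => ?_⟩
              rcases List.mem_cons.mp he with he | he
              · subst he
                exact g3 (i, j, true) (by simp)
              · exact g3 e (by simp [he])

-- ---- shared: reading a range-map row ----

theorem getD_map_range {α : Type} (f : Nat → α) (dflt : α) (M u : Nat) (h : u < M) :
    ((List.range M).map f).getD u dflt = f u := by
  simp [List.getD_eq_getElem?_getD, List.getElem?_map, List.getElem?_range h]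

-- ---- B result = min over edSpec of the bottom row ----

theorem alt_eq_min (P T : String) :
    editDistance_Fewest_Edits_alt P T
      = match ((List.range (T.toList.length + 1)).map
          (fun j => edSpec P.toList T.toList P.toList.length j)).min? with
        | some v => v
        | none => 0 := by
  have hmain := bLoop_main P.toList T.toList
      (bPhi (((List.range (T.toList.length + 1)).map
        (fun j => (P.toList.length, j, false))).reverse))
      (((List.range (T.toList.length + 1)).map
        (fun j => (P.toList.length, j, false))).reverse)
      PySem.Dict.empty (le_refl _)
      (fun i j v hv => by simp [PySem.Dict.get?_empty] at hv)
      (stackokaux_of_all_false _ _ _ (by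
        intro e he
        rw [List.mem_reverse, List.mem_map] at he
        obtain ⟨a, _, ha⟩ := he
        subst ha; rfl))
  obtain ⟨g1, _, g3⟩ := hmain
  have hrow : ((List.range (T.toList.length + 1)).map
      (fun j => (bLoop P.toList T.toList (((List.range (T.toList.length + 1)).map
        (fun j => (P.toList.length, j, false))).reverse) PySem.Dict.empty).getD
        (P.toList.length, j) 0))
      = (List.range (T.toList.length + 1)).map
        (fun j => edSpec P.toList T.toList P.toList.length j) := by
    refine List.map_congr_left (fun j hj => ?_)
    have hmem : ((P.toList.length : Nat), j, false) ∈
        (((List.range (T.toList.length + 1)).map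
          (fun j => (P.toList.length, j, false))).reverse) := by
      rw [List.mem_reverse, List.mem_map]
      exact ⟨j, hj, rfl⟩
    have hcon := g3 _ hmem
    exact getD_eq_edSpec _ _ _ _ _ hcon g1
  simp only [editDistance_Fewest_Edits_alt]
  rw [hrow]

-- ---- A side: the filled matrix's rows are edSpec rows ----

theorem length_pvSetM (d : List (List Int)) (i j : Nat) (v : Int) :
    (pvSetM d i j v).length = d.length := by simp [pvSetM]

theorem getRow_pvSetM_self (d : List (List Int)) (i j : Nat) (v : Int) (h : i < d.length) :
    (pvSetM d i j v).getD i [] = (d.getD i []).set j v := by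
  simp [pvSetM, List.getD_eq_getElem?_getD, h]

theorem getRow_pvSetM_ne (d : List (List Int)) (i i' j : Nat) (v : Int) (h : i' ≠ i) :
    (pvSetM d i j v).getD i' [] = d.getD i' [] := by
  simp [pvSetM, List.getD_eq_getElem?_getD, List.getElem?_set_ne (Ne.symm h)]

theorem build_matrix (r : List Int) :
    ∀ (k : Nat) (d : List (List Int)),
    (List.range k).foldl (fun d _ => d ++ [r]) d = d ++ List.replicate k r := by
  intro k
  induction k with
  | zero => simp
  | succ k ih =>
    intro d
    rw [List.range_succ, List.foldl_append, ih]
    simp [List.replicate_succ']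

theorem getD_append_length {α : Type} (A : List α) (x : α) (rest : List α) (dflt : α)
    (nn : Nat) (h : nn = A.length) :
    (A ++ x :: rest).getD nn dflt = x := by
  subst h
  simp [List.getD_eq_getElem?_getD]

theorem set_append_length {α : Type} (A : List α) (x : α) (rest : List α) (y : α)
    (nn : Nat) (h : nn = A.length) :
    (A ++ x :: rest).set nn y = A ++ y :: rest := by
  subst h
  induction A with
  | nil => simp
  | cons a as ih => simp [ih]

theorem init_matrix (n : Nat) :
    ∀ (k K : Nat), k ≤ K →
    (List.range k).foldl (fun d i => pvSetM d i 0 (Int.ofNat i))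
        (List.replicate K (List.replicate (n + 1) (0 : Int)))
      = ((List.range k).map (fun i => Int.ofNat i :: List.replicate n 0))
        ++ List.replicate (K - k) (List.replicate (n + 1) 0) := by
  intro k
  induction k with
  | zero => simp
  | succ k ih =>
    intro K hk
    rw [List.range_succ, List.foldl_append, ih K (by omega)]
    simp only [List.foldl_cons, List.foldl_nil]
    have h1 : K - k = (K - (k + 1)) + 1 := by omega
    rw [h1, List.replicate_succ]
    have hlen : ((List.range k).map (fun i => Int.ofNat i :: List.replicate n (0 : Int))).length = k := by simp
    rw [pvSetM, getD_append_length _ _ _ _ k hlen.symm, set_append_length _ _ _ _ k hlen.symm]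
    have h2 : (List.replicate (n + 1) (0 : Int)).set 0 (Int.ofNat k) = Int.ofNat k :: List.replicate n 0 := by
      simp [List.replicate_succ]
    rw [h2]
    simp

theorem getLastD_eq_getD {α : Type} (l : List α) (dflt : α) (m : Nat) (h : l.length = m + 1) :
    l.getLastD dflt = l.getD m dflt := by
  simp [List.getLastD_eq_getLast?, List.getLast?_eq_getElem?, List.getD_eq_getElem?_getD, h]

-- inner loop: filling row i cell by cell produces the edSpec row
theorem inner_loop_ed (p t : List Char) (i : Nat) (hi : 1 ≤ i) :
    ∀ (r k : Nat), k + r = t.length →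
    ∀ (d : List (List Int)),
    i < d.length →
    d.getD (i - 1) [] = (List.range (t.length + 1)).map (edSpec p t (i - 1)) →
    d.getD i [] = (List.range (k + 1)).map (edSpec p t i) ++ List.replicate r 0 →
    ((List.range' (k + 1) r).foldl (aInner p t i) d).getD i []
        = (List.range (t.length + 1)).map (edSpec p t i)
      ∧ ((List.range' (k + 1) r).foldl (aInner p t i) d).length = d.length
      ∧ ∀ u, u ≠ i → ((List.range' (k + 1) r).foldl (aInner p t i) d).getD u [] = d.getD u [] := by
  intro r
  induction r with
  | zero =>
    intro k hk d hd hp hri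
    refine ⟨?_, rfl, fun u _ => rfl⟩
    simp only [List.range'_zero, List.foldl_nil]
    rw [hri]
    have : k + 1 = t.length + 1 := by omega
    rw [this]
    simp
  | succ r ih =>
    intro k hk d hd hp hri
    have hkn : k < t.length := by omega
    have hine : i - 1 ≠ i := by omega
    have hH : pvGetM d i k = edSpec p t i k := by
      rw [pvGetM, hri, List.getD_append _ _ _ _ (by simp),
          getD_map_range _ _ _ _ (by omega)]
    have hV : pvGetM d (i - 1) (k + 1) = edSpec p t (i - 1) (k + 1) := by
      rw [pvGetM, hp, getD_map_range _ _ _ _ (by omega)]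
    have hDg : pvGetM d (i - 1) k = edSpec p t (i - 1) k := by
      rw [pvGetM, hp, getD_map_range _ _ _ _ (by omega)]
    have hval : (min (min (pvGetM d i k + 1) (pvGetM d (i - 1) (k + 1) + 1))
        (if p.getD (i - 1) ' ' = t.getD k ' ' then pvGetM d (i - 1) k else pvGetM d (i - 1) k + 1))
        = edSpec p t i (k + 1) := by
      rw [hH, hV, hDg, edSpec_step p t i (k + 1) (by omega) (by omega)]
      simp only [Nat.add_sub_cancel]
      split_ifs with hcmp <;> simp
    have hstep : aInner p t i d (k + 1)
        = pvSetM d i (k + 1) (edSpec p t i (k + 1)) := by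
      simp only [aInner, Nat.add_sub_cancel]
      rw [← hval]
    have hr1 : (aInner p t i d (k + 1)).getD i []
        = (List.range (k + 2)).map (edSpec p t i) ++ List.replicate r 0 := by
      rw [hstep, getRow_pvSetM_self _ _ _ _ hd, hri, List.replicate_succ,
          set_append_length _ _ _ _ _ (by simp)]
      simp [List.range_succ]
    have hp1 : (aInner p t i d (k + 1)).getD (i - 1) []
        = (List.range (t.length + 1)).map (edSpec p t (i - 1)) := by
      rw [hstep, getRow_pvSetM_ne _ _ _ _ _ hine, hp]
    have hlen1 : (aInner p t i d (k + 1)).length = d.length := by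
      rw [hstep, length_pvSetM]
    have hmain := ih (k + 1) (by omega) (aInner p t i d (k + 1))
        (by rw [hlen1]; exact hd) hp1 hr1
    refine ⟨?_, ?_, ?_⟩
    · rw [List.range'_succ, List.foldl_cons]
      exact hmain.1
    · rw [List.range'_succ, List.foldl_cons]
      exact hmain.2.1.trans hlen1
    · intro u hu
      rw [List.range'_succ, List.foldl_cons, hmain.2.2 u hu, hstep,
          getRow_pvSetM_ne _ _ _ _ _ hu]

-- outer loop: row by row, the last row becomes the edSpec bottom row
theorem outer_loop_ed (p t : List Char) :
    ∀ (r s : Nat), s + r = p.length →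
    ∀ (d : List (List Int)),
    d.length = p.length + 1 →
    d.getD s [] = (List.range (t.length + 1)).map (edSpec p t s) →
    (∀ u, s < u → u ≤ p.length → d.getD u [] = Int.ofNat u :: List.replicate t.length 0) →
    ((List.range' (s + 1) r).foldl (aOuter p t) d).getD p.length []
        = (List.range (t.length + 1)).map (edSpec p t p.length)
      ∧ ((List.range' (s + 1) r).foldl (aOuter p t) d).length = d.length := by
  intro r
  induction r with
  | zero =>
    intro s hs d hdlen hrow _
    have hsm : s = p.length := by omega
    subst hsm
    exact ⟨hrow, rfl⟩
  | succ r ih =>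
    intro s hs d hdlen hrow hrows
    have hsm : s < p.length := by omega
    have hrowS : d.getD (s + 1) [] = Int.ofNat (s + 1) :: List.replicate t.length 0 :=
      hrows (s + 1) (by omega) (by omega)
    have hrowS' : d.getD (s + 1) []
        = (List.range 1).map (edSpec p t (s + 1)) ++ List.replicate t.length 0 := by
      rw [hrowS]
      simp [List.range_succ, edSpec_col0]
    have hin := inner_loop_ed p t (s + 1) (by omega) t.length 0 (by omega) d
        (by omega) (by simpa using hrow) hrowS'
    obtain ⟨h1, h2, h3⟩ := hin
    simp only [Nat.zero_add] at h1 h2 h3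
    have hmain := ih (s + 1) (by omega) ((List.range' 1 t.length).foldl (aInner p t (s + 1)) d)
        (by rw [h2, hdlen]) h1
        (fun u hu1 hu2 => by
          rw [h3 u (by omega)]
          exact hrows u (by omega) hu2)
    refine ⟨?_, ?_⟩
    · rw [List.range'_succ, List.foldl_cons]
      exact hmain.1
    · rw [List.range'_succ, List.foldl_cons]
      exact hmain.2.trans h2

theorem a_eq_min (P T : String) :
    editDistance_Fewest_Edits P T
      = match ((List.range (T.toList.length + 1)).map
          (fun j => edSpec P.toList T.toList P.toList.length j)).min? with
        | some v => v
        | none => 0 := by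
  set p := P.toList
  set t := T.toList
  have hD0 : (List.range (p.length + 1)).foldl
        (fun d _ => d ++ [List.replicate (t.length + 1) (0 : Int)]) ([] : List (List Int))
      = List.replicate (p.length + 1) (List.replicate (t.length + 1) 0) := by
    simp [build_matrix (List.replicate (t.length + 1) 0) (p.length + 1) []]
  have hD1 : (List.range (p.length + 1)).foldl (fun d i => pvSetM d i 0 (Int.ofNat i))
        ((List.range (p.length + 1)).foldl
          (fun d _ => d ++ [List.replicate (t.length + 1) (0 : Int)]) [])
      = (List.range (p.length + 1)).map (fun i => Int.ofNat i :: List.replicate t.length 0) := by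
    rw [hD0, init_matrix t.length (p.length + 1) (p.length + 1) (le_refl _)]
    simp
  have hrow0 : ((List.range (p.length + 1)).map
        (fun i => Int.ofNat i :: List.replicate t.length (0 : Int))).getD 0 []
      = (List.range (t.length + 1)).map (edSpec p t 0) := by
    rw [getD_map_range _ _ _ _ (by omega)]
    have : ∀ j ∈ List.range (t.length + 1), edSpec p t 0 j = 0 := fun j _ => edSpec_zero p t j
    rw [List.map_congr_left this]
    simp [List.map_const', List.replicate_succ]
  have hout := outer_loop_ed p t p.length 0 (by omega)
      ((List.range (p.length + 1)).map (fun i => Int.ofNat i :: List.replicate t.length 0))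
      (by simp) hrow0
      (fun u hu0 hum => by rw [getD_map_range _ _ _ _ (by omega)])
  simp only [Nat.zero_add] at hout
  simp only [editDistance_Fewest_Edits]
  rw [hD1, getLastD_eq_getD _ [] p.length (hout.2.trans (by simp)), hout.1]

-- ===== VERDICT (by name: the statement is the Claim_ definition above) =====
theorem editDistance_Fewest_Edits_spec : Claim_equal_editDistance_Fewest_Edits := by
  intro P T _
  show editDistance_Fewest_Edits P T = editDistance_Fewest_Edits_alt P T
  rw [a_eq_min, alt_eq_min]
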